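-- pv_equiv track=rewrite | github.com/gyxuan31/Note | OA/jd.py | need_ops
-- ===== SOURCE A (Python) =====
-- def need_ops(a, X):
--     """给定X，返回把数组抬到|相邻差|<=X所需的最小加法次数"""
--     n = len(a)
--     b = a[:]  # 复制一份作为工作数组
--     # 正向：右侧至少为 左侧-X
--     for i in range(1, n):
--         if b[i] < b[i-1] - X:
--             b[i] = b[i-1] - X
--     # 反向：左侧至少为 右侧-X
--     for i in range(n-2, -1, -1):
--         if b[i] < b[i+1] - X:
--             b[i] = b[i+1] - X
--     # 计算总加法次数（可能很大，用Python int即可）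
--     s = 0
--     for i in range(n):
--         s += b[i] - a[i]
--     return s
-- ===== SOURCE B (Python) =====
-- def need_ops(a, X):
--     """给定X，返回把数组抬到|相邻差|<=X所需的最小加法次数"""
--     # Closed form: position i must be raised to max_j (a[j] - |i-j|*X);
--     # sum those deficits directly, no relaxation sweeps or work array.
--     n = len(a)
--     s = 0
--     for i in range(n):
--         best = a[0] - i * X
--         for j in range(1, n):
--             best = max(best, a[j] - abs(i - j) * X)
--         s += best - a[i]
--     return s
-- ===== Notes on version B (the rewrite author's own statement) =====
-- stated objective: alternative
-- what changed: Replaces A's two in-place linear relaxation sweeps plus a difference pass over a work array with a direct per-position closed form: each position must reach max_j (a[j] - |i-j|*X), and the deficits are summed in one nested loop with no work array.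
-- outside the precondition, e.g. on need_ops([0, -2, 3], -4): A returns 35, B returns 25
import Mathlib
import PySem

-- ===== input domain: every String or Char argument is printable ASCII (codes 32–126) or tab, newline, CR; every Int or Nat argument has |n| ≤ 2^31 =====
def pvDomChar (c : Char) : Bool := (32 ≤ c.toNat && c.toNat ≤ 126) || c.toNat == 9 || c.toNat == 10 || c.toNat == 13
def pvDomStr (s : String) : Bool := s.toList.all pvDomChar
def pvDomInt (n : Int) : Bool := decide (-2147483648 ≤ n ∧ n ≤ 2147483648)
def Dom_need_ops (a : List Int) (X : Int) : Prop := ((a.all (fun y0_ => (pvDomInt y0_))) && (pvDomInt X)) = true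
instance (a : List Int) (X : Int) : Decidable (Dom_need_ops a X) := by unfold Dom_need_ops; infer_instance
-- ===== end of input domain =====

-- B replaces A's two in-place relaxation sweeps over a work array by summing, per position,
-- the closed-form requirement max_j (a[j] - |i-j|*X); an alternative decomposition, not faster.

-- ===== PORT A =====
-- loop bodies of A's two sweeps (helpers; the loops themselves are the foldl's in need_ops)
def fwdStep (X : Int) (b : List Int) (i : Int) : List Int :=
  if PySem.List.pyGetD b i 0 < PySem.List.pyGetD b (i - 1) 0 - X then
    PySem.List.pySetD b i (PySem.List.pyGetD b (i - 1) 0 - X)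
  else b

def bwdStep (X : Int) (b : List Int) (i : Int) : List Int :=
  if PySem.List.pyGetD b i 0 < PySem.List.pyGetD b (i + 1) 0 - X then
    PySem.List.pySetD b i (PySem.List.pyGetD b (i + 1) 0 - X)
  else b

def need_ops (a : List Int) (X : Int) : Int :=
  let n : Int := a.length
  let b := a
  let b := (PySem.List.pyRange 1 n 1).foldl (fwdStep X) b
  let b := (PySem.List.pyRange (n - 2) (-1) (-1)).foldl (bwdStep X) b
  (PySem.List.pyRange 0 n 1).foldl (fun s i =>
    s + (PySem.List.pyGetD b i 0 - PySem.List.pyGetD a i 0)) 0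

-- ===== PORT B =====
def need_ops_alt (a : List Int) (X : Int) : Int :=
  let n : Int := a.length
  (PySem.List.pyRange 0 n 1).foldl (fun s i =>
    let best := (PySem.List.pyRange 1 n 1).foldl
      (fun best j => max best (PySem.List.pyGetD a j 0 - |i - j| * X))
      (PySem.List.pyGetD a 0 0 - i * X)
    s + (best - PySem.List.pyGetD a i 0)) 0


-- ===== PRECONDITION & SPEC =====
-- Pre_ excludes negative X, on which the target |adjacent diff| <= X is unsatisfiable, so A's
-- sweep residue and B's closed-form value are both defensible artefacts and legitimately differ.
def Pre_need_ops (a : List Int) (X : Int) : Prop := 0 ≤ X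
instance (a : List Int) (X : Int) : Decidable (Pre_need_ops a X) := by unfold Pre_need_ops; infer_instance
def pvWitness_need_ops : List Int × Int := ([3, 0, 2], 1)

def Spec_need_ops (a : List Int) (X : Int) (out : Int) : Prop := out = need_ops_alt a X
instance (a : List Int) (X : Int) (out : Int) : Decidable (Spec_need_ops a X out) := by unfold Spec_need_ops; infer_instance

-- ===== CLAIM (what is proved, stated in full; the proofs are below) =====
def Claim_equal_need_ops : Prop := ∀ (a : List Int) (X : Int), Dom_need_ops a X → Pre_need_ops a X → Spec_need_ops a X (need_ops a X)

-- ===== LEMMAS AND PROOFS =====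
def Qspec (a : List Int) (X : Int) (i : Nat) (v : Int) : Prop :=
  (∀ j : Nat, j ≤ i → j < a.length → a.getD j 0 - ((i : Int) - j) * X ≤ v) ∧
  (∃ j : Nat, j ≤ i ∧ j < a.length ∧ v = a.getD j 0 - ((i : Int) - j) * X)

def Sspec (a : List Int) (X : Int) (i : Nat) (v : Int) : Prop :=
  (∀ j : Nat, j < a.length → a.getD j 0 - |(i : Int) - j| * X ≤ v) ∧
  (∃ j : Nat, j < a.length ∧ v = a.getD j 0 - |(i : Int) - j| * X)

theorem Sspec_unique {a : List Int} {X : Int} {i : Nat} {v w : Int}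
    (hv : Sspec a X i v) (hw : Sspec a X i w) : v = w := by
  obtain ⟨hv1, j, hj, hje⟩ := hv
  obtain ⟨hw1, k, hk, hke⟩ := hw
  have h1 := hw1 j hj
  have h2 := hv1 k hk
  omega

theorem Qspec_zero {a : List Int} (X : Int) (h : 0 < a.length) :
    Qspec a X 0 (a.getD 0 0) := by
  constructor
  · intro j hj _; interval_cases j; simp
  · exact ⟨0, le_refl _, h, by simp⟩

theorem Qspec_step {a : List Int} {X : Int} {i : Nat} {v : Int}
    (hv : Qspec a X i v) (hi : i + 1 < a.length) :
    Qspec a X (i + 1) (max (a.getD (i + 1) 0) (v - X)) := by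
  obtain ⟨h1, j0, hj0, hj0l, hj0e⟩ := hv
  constructor
  · intro j hj hjl
    rcases Nat.lt_or_ge j (i + 1) with hlt | hge
    · have hji : j ≤ i := by omega
      have := h1 j hji hjl
      have : a.getD j 0 - ((i : Int) + 1 - j) * X ≤ v - X := by
        have e : ((i : Int) + 1 - j) * X = ((i : Int) - j) * X + X := by ring
        rw [e]; omega
      calc a.getD j 0 - ((i : Int) + 1 - j) * X ≤ v - X := this
        _ ≤ _ := le_max_right _ _
    · have : j = i + 1 := by omega
      subst this
      have : ((i : Int) + 1 - (i + 1 : Nat)) * X = 0 := by push_cast; ring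
      push_cast
      push_cast at this
      rw [this]
      simp
  · rcases le_total (a.getD (i + 1) 0) (v - X) with h | h
    · refine ⟨j0, by omega, hj0l, ?_⟩
      rw [max_eq_right h, hj0e]
      push_cast; ring
    · refine ⟨i + 1, le_refl _, hi, ?_⟩
      rw [max_eq_left h]
      push_cast; ring

theorem Qspec_last {a : List Int} {X : Int} {v : Int} (h : 0 < a.length)
    (hv : Qspec a X (a.length - 1) v) : Sspec a X (a.length - 1) v := by
  obtain ⟨h1, j0, hj0, hj0l, hj0e⟩ := hv
  constructor
  · intro j hj
    have habs : |((a.length - 1 : Nat) : Int) - j| = ((a.length - 1 : Nat) : Int) - j := by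
      rw [abs_of_nonneg]; omega
    rw [habs]; exact h1 j (by omega) hj
  · refine ⟨j0, hj0l, ?_⟩
    have habs : |((a.length - 1 : Nat) : Int) - j0| = ((a.length - 1 : Nat) : Int) - j0 := by
      rw [abs_of_nonneg]; omega
    rw [habs]; exact hj0e

theorem Sspec_step {a : List Int} {X : Int} {k : Nat} {u w : Int} (hX : 0 ≤ X)
    (hq : Qspec a X k u) (hs : Sspec a X (k + 1) w) (_hk : k + 1 < a.length) :
    Sspec a X k (max u (w - X)) := by
  obtain ⟨hq1, jq, hjq, hjql, hjqe⟩ := hq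
  obtain ⟨hs1, js, hjsl, hjse⟩ := hs
  constructor
  · intro j hjl
    rcases Nat.lt_or_ge k j with hgt | hle
    · -- j > k : go through w
      have h1 := hs1 j hjl
      have e1 : |((k : Int) + 1) - j| = (j : Int) - k - 1 := by rw [abs_of_nonpos (by omega)]; omega
      have e2 : |(k : Int) - j| = (j : Int) - k := by rw [abs_of_nonpos (by omega)]; omega
      push_cast at h1 ⊢
      rw [e1] at h1; rw [e2]
      have e3 : ((j : Int) - k) * X = ((j : Int) - k - 1) * X + X := by ring
      rw [e3]
      have : a.getD j 0 - (((j : Int) - k - 1) * X + X) ≤ w - X := by omega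
      exact le_trans this (le_max_right _ _)
    · -- j ≤ k : go through u
      have h1 := hq1 j hle hjl
      have e2 : |(k : Int) - j| = (k : Int) - j := by rw [abs_of_nonneg (by omega)]
      rw [e2]
      exact le_trans h1 (le_max_left _ _)
  · rcases le_total (w - X) u with h | h
    · refine ⟨jq, hjql, ?_⟩
      rw [max_eq_left h, hjqe]
      have : |(k : Int) - jq| = (k : Int) - jq := by rw [abs_of_nonneg (by omega)]
      rw [this]
    · rcases Nat.lt_or_ge k js with hgt | hle
      · refine ⟨js, hjsl, ?_⟩
        rw [max_eq_right h, hjse]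
        have e1 : |((k : Int) + 1) - js| = (js : Int) - k - 1 := by rw [abs_of_nonpos (by omega)]; omega
        have e2 : |(k : Int) - js| = (js : Int) - k := by rw [abs_of_nonpos (by omega)]; omega
        push_cast
        rw [e1, e2]; ring
      · -- js ≤ k : w - X ≤ u, combined with u ≤ w - X gives equality to u's witness... derive
        refine ⟨jq, hjql, ?_⟩
        have hu := hq1 js hle hjsl
        push_cast at hjse
        have e1 : |((k : Int) + 1) - js| = (k : Int) + 1 - js := by rw [abs_of_nonneg (by omega)]
        rw [e1] at hjse
        have e3 : ((k : Int) + 1 - js) * X = ((k : Int) - js) * X + X := by ring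
        rw [hjse, e3] at h
        -- h : a[js] - ((k-js)X + X) - X ≥ u ; hu : a[js] - (k-js)X ≤ u ; X ≥ 0
        have hXX : u ≤ u - 2 * X := by omega
        have hmax : max u (w - X) = u := by
          have : w - X = u := by omega
          omega
        rw [hmax, hjqe]
        have : |(k : Int) - jq| = (k : Int) - jq := by rw [abs_of_nonneg (by omega)]
        rw [this]

theorem foldl_len_inv (f : List Int → Int → List Int)
    (h : ∀ c i, (f c i).length = c.length) (l : List Int) (c : List Int) :
    (l.foldl f c).length = c.length := by
  induction l generalizing c with
  | nil => rfl
  | cons x t ih => simp [List.foldl_cons, ih, h]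

theorem fwdStep_len (X : Int) (c : List Int) (i : Int) : (fwdStep X c i).length = c.length := by
  unfold fwdStep; split <;> simp [PySem.List.length_pySetD]

theorem bwdStep_len (X : Int) (c : List Int) (i : Int) : (bwdStep X c i).length = c.length := by
  unfold bwdStep; split <;> simp [PySem.List.length_pySetD]

theorem fwdStep_get (X : Int) (c : List Int) (m t : Nat) (hm : 1 ≤ m) (hml : m < c.length) :
    PySem.List.pyGetD (fwdStep X c ↑m) ↑t 0 =
      if t = m then max (PySem.List.pyGetD c ↑m 0) (PySem.List.pyGetD c ↑(m - 1) 0 - X)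
      else PySem.List.pyGetD c ↑t 0 := by
  unfold fwdStep
  have e : (↑m - 1 : Int) = ↑(m - 1) := by omega
  rw [e]
  split_ifs with h1 h2 h2
  · rw [PySem.List.pyGetD_pySetD_natCast c m t _ 0 hml, if_pos h2]
    rw [max_eq_right (le_of_lt h1)]
  · rw [PySem.List.pyGetD_pySetD_natCast c m t _ 0 hml, if_neg h2]
  · rw [h2, max_eq_left (not_lt.mp h1)]
  · rfl

theorem bwdStep_get (X : Int) (c : List Int) (k t : Nat) (hml : k < c.length) :
    PySem.List.pyGetD (bwdStep X c ↑k) ↑t 0 =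
      if t = k then max (PySem.List.pyGetD c ↑k 0) (PySem.List.pyGetD c ↑(k + 1) 0 - X)
      else PySem.List.pyGetD c ↑t 0 := by
  unfold bwdStep
  have e : (↑k + 1 : Int) = ↑(k + 1) := by omega
  rw [e]
  split_ifs with h1 h2 h2
  · rw [PySem.List.pyGetD_pySetD_natCast c k t _ 0 hml, if_pos h2]
    rw [max_eq_right (le_of_lt h1)]
  · rw [PySem.List.pyGetD_pySetD_natCast c k t _ 0 hml, if_neg h2]
  · rw [h2, max_eq_left (not_lt.mp h1)]
  · rfl

theorem fwd_loop (a : List Int) (X : Int) :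
    ∀ (k m : Nat) (c : List Int), 1 ≤ m → m + k = a.length → c.length = a.length →
      (∀ t : Nat, t < m → Qspec a X t (PySem.List.pyGetD c ↑t 0)) →
      (∀ t : Nat, m ≤ t → t < a.length → PySem.List.pyGetD c ↑t 0 = a.getD t 0) →
      ∀ t : Nat, t < a.length →
        Qspec a X t (PySem.List.pyGetD ((PySem.List.pyRange ↑m ↑a.length 1).foldl (fwdStep X) c) ↑t 0) := by
  intro k
  induction k with
  | zero =>
    intro m c h1 h2 h3 h4 h5 t ht
    rw [PySem.List.pyRange_one_eq_nil (by exact_mod_cast Nat.le_of_eq (by omega))]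
    exact h4 t (by omega)
  | succ k ih =>
    intro m c h1 h2 h3 h4 h5 t ht
    have hmn : (↑m : Int) < ↑a.length := by exact_mod_cast (by omega : m < a.length)
    rw [PySem.List.pyRange_one_cons hmn, List.foldl_cons]
    have e : (↑m : Int) + 1 = ↑(m + 1) := by omega
    rw [e]
    refine ih (m + 1) (fwdStep X c ↑m) (by omega) (by omega) (by rw [fwdStep_len]; exact h3) ?_ ?_ t ht
    · intro t' ht'
      rw [fwdStep_get X c m t' h1 (by omega)]
      rcases Nat.eq_or_lt_of_le (Nat.lt_succ_iff.mp ht') with heq | hlt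
      · rw [if_pos heq, heq]
        have hq := Qspec_step (i := m - 1) (h4 (m - 1) (by omega)) (by omega)
        have em : m - 1 + 1 = m := by omega
        rw [em] at hq
        rw [h5 m (le_refl m) (by omega)]
        exact hq
      · rw [if_neg (by omega)]
        exact h4 t' hlt
    · intro t' h1' h2'
      rw [fwdStep_get X c m t' h1 (by omega), if_neg (by omega)]
      exact h5 t' (by omega) h2'

theorem bwd_loop (a : List Int) (X : Int) (hX : 0 ≤ X) :
    ∀ (k : Nat) (c : List Int), k < a.length → c.length = a.length →
      (∀ t : Nat, t < k → Qspec a X t (PySem.List.pyGetD c ↑t 0)) →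
      (∀ t : Nat, k ≤ t → t < a.length → Sspec a X t (PySem.List.pyGetD c ↑t 0)) →
      ∀ t : Nat, t < a.length →
        Sspec a X t (PySem.List.pyGetD ((PySem.List.pyRange ((k : Int) - 1) (-1) (-1)).foldl (bwdStep X) c) ↑t 0) := by
  intro k
  induction k with
  | zero =>
    intro c h1 h2 h3 h4 t ht
    rw [show ((0 : Nat) : Int) - 1 = -1 by omega, PySem.List.pyRange_neg_one_eq_nil (le_refl _)]
    exact h4 t (Nat.zero_le t) ht
  | succ k ih =>
    intro c h1 h2 h3 h4 t ht
    rw [show ((k + 1 : Nat) : Int) - 1 = ↑k by omega,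
        PySem.List.pyRange_neg_one_cons (by omega)]
    rw [List.foldl_cons]
    refine ih (bwdStep X c ↑k) (by omega) (by rw [bwdStep_len]; exact h2) ?_ ?_ t ht
    · intro t' ht'
      rw [bwdStep_get X c k t' (by omega), if_neg (by omega)]
      exact h3 t' (by omega)
    · intro t' h1' h2'
      rw [bwdStep_get X c k t' (by omega)]
      rcases Nat.eq_or_lt_of_le h1' with heq | hlt
      · rw [if_pos heq.symm, ← heq]
        exact Sspec_step hX (h3 k (Nat.lt_succ_self k)) (h4 (k + 1) (le_refl _) h1) h1
      · rw [if_neg (by omega)]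
        exact h4 t' (by omega) h2'

theorem best_spec (a : List Int) (X : Int) (t : Nat) (ht : t < a.length) :
    Sspec a X t ((PySem.List.pyRange 1 ↑a.length 1).foldl
      (fun best j => max best (PySem.List.pyGetD a j 0 - |(↑t : Int) - j| * X))
      (PySem.List.pyGetD a 0 0 - ↑t * X)) := by
  rw [← List.foldl_map (f := fun j : Int => PySem.List.pyGetD a j 0 - |(↑t : Int) - j| * X)
      (g := max)]
  set l := (PySem.List.pyRange 1 ↑a.length 1).map
    (fun j : Int => PySem.List.pyGetD a j 0 - |(↑t : Int) - j| * X) with hl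
  set init := PySem.List.pyGetD a 0 0 - ↑t * X with hinit
  obtain ⟨hle1, hle2⟩ := PySem.List.le_foldl_max l init
  constructor
  · intro j hjl
    rcases Nat.eq_zero_or_pos j with h0 | hpos
    · subst h0
      refine le_trans (le_of_eq ?_) hle1
      simp [hinit, PySem.List.pyGetD_zero, List.getD]
    · refine le_trans (le_of_eq ?_) (hle2 (PySem.List.pyGetD a ↑j 0 - |(↑t : Int) - ↑j| * X) ?_)
      · simp [List.getD]
      · rw [hl]
        exact List.mem_map.mpr ⟨↑j, PySem.List.mem_pyRange_one.mpr
          ⟨by exact_mod_cast hpos, by exact_mod_cast hjl⟩, rfl⟩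
  · rcases PySem.List.foldl_max_mem l init with hm | hm
    · refine ⟨0, by omega, ?_⟩
      rw [hm, hinit]
      simp [PySem.List.pyGetD_zero, List.getD]
    · obtain ⟨x, hx, hxe⟩ := List.mem_map.mp (hl ▸ hm)
      obtain ⟨hx1, hx2⟩ := PySem.List.mem_pyRange_one.mp hx
      refine ⟨x.toNat, by omega, ?_⟩
      rw [← hxe]
      have hc : (↑x.toNat : Int) = x := by omega
      rw [PySem.List.pyGetD_eq_getElem a 0 (by omega) hx2]
      rw [List.getD_eq_getElem a 0 (by omega), hc]


-- ===== VERDICT (by name: the statement is the Claim_ definition above) =====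
theorem need_ops_spec : Claim_equal_need_ops := by
  intro a X _ hX
  unfold Pre_need_ops at hX
  unfold Spec_need_ops
  simp only [need_ops, need_ops_alt]
  rcases Nat.eq_zero_or_pos a.length with h0 | hpos
  · obtain rfl : a = [] := List.length_eq_zero_iff.mp h0
    simp [PySem.List.pyRange_one_eq_nil]
  · set b1 := (PySem.List.pyRange 1 ↑a.length 1).foldl (fwdStep X) a with hb1
    have hb1q : ∀ t : Nat, t < a.length → Qspec a X t (PySem.List.pyGetD b1 ↑t 0) := by
      have hmain := fwd_loop a X (a.length - 1) 1 a (le_refl 1) (by omega) rfl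
        (by intro t ht; interval_cases t; simpa [List.getD, PySem.List.pyGetD_zero] using Qspec_zero X hpos)
        (by intro t _ _; simp)
      simpa using hmain
    have hb1len : b1.length = a.length := foldl_len_inv _ (fwdStep_len X) _ a
    set b2 := (PySem.List.pyRange (↑a.length - 2) (-1) (-1)).foldl (bwdStep X) b1 with hb2
    have hb2s : ∀ t : Nat, t < a.length → Sspec a X t (PySem.List.pyGetD b2 ↑t 0) := by
      have hmain := bwd_loop a X hX (a.length - 1) b1 (by omega) hb1len
        (fun t ht => hb1q t (by omega))
        (by
          intro t h1 h2
          have : t = a.length - 1 := by omega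
          subst this
          exact Qspec_last hpos (hb1q _ (by omega)))
      rw [show ((a.length - 1 : Nat) : Int) - 1 = ↑a.length - 2 by omega] at hmain
      exact hmain
    rw [PySem.List.foldl_add, PySem.List.foldl_add]
    congr 1
    apply congrArg
    apply List.map_congr_left
    intro i hi
    obtain ⟨hi0, hi1⟩ := PySem.List.mem_pyRange_one.mp hi
    rw [show i = ↑i.toNat by omega]
    have hA := hb2s i.toNat (by omega)
    have hB := best_spec a X i.toNat (by omega)
    rw [Sspec_unique hA hB]
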